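-- pv_equiv track=rewrite | github.com/rivforthesesh/aoc-2020 | 20b.py | next_tile_pos
-- ===== SOURCE A (Python) =====
-- def next_tile_pos(puzzle):
--     positions_done = [(tile[1],tile[2]) for tile in puzzle]
--     adj_positions = []
--     offsets = [(1,0),(-1,0),(0,1),(0,-1)]
--     for pos in positions_done:
--         for offset in offsets:
--             adj_pos = (pos[0] + offset[0], pos[1] + offset[1])
--             if not adj_pos in positions_done + adj_positions:
--                 adj_positions.append(adj_pos)
--     return adj_positions
-- ===== SOURCE B (Python) =====
-- def next_tile_pos(puzzle):
--     occupied = {(t[1], t[2]) for t in puzzle}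
--     cands = [n for t in puzzle
--              for n in ((t[1] + 1, t[2]), (t[1] - 1, t[2]), (t[1], t[2] + 1), (t[1], t[2] - 1))]
--     out = []
--     while cands:
--         c = cands[0]
--         if c not in occupied:
--             out.append(c)
--         cands = [d for d in cands if d != c]
--     return out
-- ===== Notes on version B (the rewrite author's own statement) =====
-- stated objective: alternative
-- what changed: Replaces A's grow-and-rescan dedup (membership test against positions_done + adj_positions for every candidate, appending to a seen/output list) with a sieve: take the head of the candidate stream, emit it if unoccupied, and delete all its duplicates from the remaining stream by filtering, so no seen-structure is maintained at all.
import Mathlib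
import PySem

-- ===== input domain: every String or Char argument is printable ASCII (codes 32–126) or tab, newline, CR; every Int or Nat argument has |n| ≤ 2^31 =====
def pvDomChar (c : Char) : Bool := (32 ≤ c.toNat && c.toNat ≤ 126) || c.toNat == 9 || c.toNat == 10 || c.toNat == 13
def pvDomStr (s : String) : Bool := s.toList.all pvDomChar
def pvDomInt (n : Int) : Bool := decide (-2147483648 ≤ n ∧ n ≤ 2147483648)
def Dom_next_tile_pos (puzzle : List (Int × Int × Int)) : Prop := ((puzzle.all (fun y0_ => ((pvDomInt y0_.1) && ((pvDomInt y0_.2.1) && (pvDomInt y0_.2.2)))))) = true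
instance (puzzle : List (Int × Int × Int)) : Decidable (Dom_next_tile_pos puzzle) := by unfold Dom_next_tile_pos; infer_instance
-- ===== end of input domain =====

-- B keeps no seen-structure: it takes the head candidate, emits it if unoccupied, and deletes all
-- its duplicates from the remaining candidate stream by filtering (sieve-style dedup), instead of
-- A's grow-and-rescan of positions_done + adj_positions.

-- ===== PORT A =====
def next_tile_pos (puzzle : List (Int × Int × Int)) : List (Int × Int) :=
  let positions_done := puzzle.map (fun tile => (tile.2.1, tile.2.2))
  let offsets : List (Int × Int) := [(1, 0), (-1, 0), (0, 1), (0, -1)]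
  positions_done.foldl (fun adj_positions pos =>
    offsets.foldl (fun adj_positions offset =>
      let adj_pos := (pos.1 + offset.1, pos.2 + offset.2)
      if ¬ (adj_pos ∈ positions_done ++ adj_positions) then adj_positions ++ [adj_pos]
      else adj_positions) adj_positions) []

-- ===== PORT B =====
-- Source B's 'while cands:' loop: c = cands[0]; emit c if unoccupied; cands = [d for d in cands if d != c]
def pvBLoop (occupied : PySem.Set (Int × Int)) : List (Int × Int) → List (Int × Int)
  | [] => []
  | c :: rest =>
    (if ¬ PySem.Set.contains occupied c then [c] else []) ++
      pvBLoop occupied ((c :: rest).filter (fun d => d ≠ c))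
termination_by cands => cands.length
decreasing_by
  simp only [List.filter_cons, decide_not]
  simp [List.length_cons]
  exact List.length_filter_le _ _

def next_tile_pos_alt (puzzle : List (Int × Int × Int)) : List (Int × Int) :=
  let occupied : PySem.Set (Int × Int) := PySem.Set.ofList (puzzle.map (fun t => (t.2.1, t.2.2)))
  let cands := puzzle.flatMap (fun t =>
    [(t.2.1 + 1, t.2.2), (t.2.1 - 1, t.2.2), (t.2.1, t.2.2 + 1), (t.2.1, t.2.2 - 1)])
  pvBLoop occupied cands

-- ===== PRECONDITION & SPEC =====
def Spec_next_tile_pos (puzzle : List (Int × Int × Int)) (out : List (Int × Int)) : Prop := out = next_tile_pos_alt puzzle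
instance (puzzle : List (Int × Int × Int)) (out : List (Int × Int)) : Decidable (Spec_next_tile_pos puzzle out) := by unfold Spec_next_tile_pos; infer_instance

-- ===== CLAIM (what is proved, stated in full; the proofs are below) =====
def Claim_equal_next_tile_pos : Prop := ∀ (puzzle : List (Int × Int × Int)), Dom_next_tile_pos puzzle → Spec_next_tile_pos puzzle (next_tile_pos puzzle)

-- ===== LEMMAS AND PROOFS =====

lemma pvBLoop_nil (s : PySem.Set (Int × Int)) : pvBLoop s [] = [] := by
  rw [pvBLoop]

lemma pvBLoop_cons (s : PySem.Set (Int × Int)) (c : Int × Int) (rest : List (Int × Int)) :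
    pvBLoop s (c :: rest)
    = (if ¬ PySem.Set.contains s c then [c] else []) ++
        pvBLoop s ((c :: rest).filter (fun d => d ≠ c)) := by
  rw [pvBLoop]

-- A's nested loops are one fold over the flattened candidate list.
lemma pv_flatten {α β γ δ : Type} (l : List α) (offs : List β) (g : α → β → δ)
    (f : γ → δ → γ) (init : γ) :
    l.foldl (fun acc a => offs.foldl (fun acc2 o => f acc2 (g a o)) acc) init
    = (l.flatMap (fun a => offs.map (g a))).foldl f init := by
  induction l generalizing init with
  | nil => rfl
  | cons x xs ih => simp [List.foldl_append, List.foldl_map, ih]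

-- deleting an occupied position from the stream does not change pvBLoop's output
lemma pv_del_occupied (P : List (Int × Int)) (c : Int × Int) (hc : c ∈ P) :
    ∀ (n : ℕ) (xs : List (Int × Int)), xs.length ≤ n →
    pvBLoop (PySem.Set.ofList P) (xs.filter (fun d => d ≠ c))
      = pvBLoop (PySem.Set.ofList P) xs := by
  intro n
  induction n with
  | zero =>
    intro xs h
    have : xs = [] := List.eq_nil_of_length_eq_zero (Nat.le_zero.mp h)
    subst this; rfl
  | succ n ih =>
    intro xs h
    cases xs with
    | nil => rfl
    | cons d xs' =>
      by_cases hdc : d = c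
      · subst hdc
        have hcontains : PySem.Set.contains (PySem.Set.ofList P) d = true := by
          rw [PySem.Set.contains_iff, PySem.Set.mem_ofList]; exact hc
        rw [pvBLoop_cons]
        simp only [List.filter_cons, hcontains]
        have h2 : (decide (d ≠ d)) = false := by simp
        simp
      · have h1 : (decide (d ≠ c)) = true := by simpa using hdc
        have h2 : (decide (d ≠ d)) = false := by simp
        simp only [List.filter_cons, h1, if_true]
        rw [pvBLoop_cons, pvBLoop_cons]
        congr 1
        simp only [List.filter_cons, h2, if_neg (by simp : ¬ (false = true))]
        have hcomm : (xs'.filter (fun e => decide (e ≠ c))).filter (fun e => decide (e ≠ d))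
            = (xs'.filter (fun e => decide (e ≠ d))).filter (fun e => decide (e ≠ c)) := by
          simp [List.filter_filter, Bool.and_comm]
        rw [hcomm]
        exact ih (xs'.filter (fun e => decide (e ≠ d)))
          (le_trans (List.length_filter_le _ _) (Nat.le_of_succ_le_succ h))

-- A's foldl (the growing output doubles as the seen list) equals B's sieve loop
-- run on the not-yet-seen part of the candidate stream.
lemma pv_main (P : List (Int × Int)) :
    ∀ (n : ℕ) (cs : List (Int × Int)), cs.length ≤ n → ∀ (acc : List (Int × Int)),
    cs.foldl (fun a c => if ¬ (c ∈ P ++ a) then a ++ [c] else a) acc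
      = acc ++ pvBLoop (PySem.Set.ofList P) (cs.filter (fun d => ¬ d ∈ acc)) := by
  intro n
  induction n with
  | zero =>
    intro cs h acc
    have : cs = [] := List.eq_nil_of_length_eq_zero (Nat.le_zero.mp h)
    subst this; simp [pvBLoop_nil]
  | succ n ih =>
    intro cs h acc
    cases cs with
    | nil => simp [pvBLoop_nil]
    | cons c cs' =>
      have h' : cs'.length ≤ n := Nat.le_of_succ_le_succ h
      simp only [List.foldl_cons, List.filter_cons]
      by_cases hacc : c ∈ acc
      · have hmem : ¬ ¬ (c ∈ P ++ acc) := not_not_intro (List.mem_append.mpr (Or.inr hacc))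
        rw [if_neg hmem]
        have hf : (decide (¬ c ∈ acc)) = false := by simpa using hacc
        rw [hf, if_neg (by simp : ¬ (false = true))]
        exact ih cs' h' acc
      · have hf : (decide (¬ c ∈ acc)) = true := by simpa using hacc
        rw [hf, if_pos rfl]
        by_cases hP : c ∈ P
        · have hmem : ¬ ¬ (c ∈ P ++ acc) := not_not_intro (List.mem_append.mpr (Or.inl hP))
          rw [if_neg hmem]
          have hcontains : PySem.Set.contains (PySem.Set.ofList P) c = true := by
            rw [PySem.Set.contains_iff, PySem.Set.mem_ofList]; exact hP
          rw [pvBLoop_cons]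
          simp only [hcontains, List.filter_cons]
          have h2 : (decide (c ≠ c)) = false := by simp
          simp only [h2, if_neg (by simp : ¬ (false = true))]
          rw [pv_del_occupied P c hP (cs'.filter (fun d => ¬ d ∈ acc)).length
            (cs'.filter (fun d => ¬ d ∈ acc)) le_rfl]
          exact ih cs' h' acc
        · have hmem : ¬ (c ∈ P ++ acc) := by rw [List.mem_append]; tauto
          rw [if_pos hmem, ih cs' h' (acc ++ [c]), pvBLoop_cons]
          have hcontains : PySem.Set.contains (PySem.Set.ofList P) c = false := by
            simp only [Bool.eq_false_iff, ne_eq, PySem.Set.contains_iff, PySem.Set.mem_ofList]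
            exact hP
          simp only [hcontains, if_pos (by simp : ¬ (false = true))]
          have hpred : cs'.filter (fun d => ¬ d ∈ acc ++ [c])
              = (cs'.filter (fun d => ¬ d ∈ acc)).filter (fun d => d ≠ c) := by
            rw [List.filter_filter]
            apply List.filter_congr
            intro d _
            by_cases h1 : d ∈ acc <;> by_cases h2 : d = c <;> simp [h1, h2]
          rw [hpred]
          simp only [List.filter_cons]
          have h2 : (decide (c ≠ c)) = false := by simp
          simp only [h2, if_neg (by simp : ¬ (false = true)),
            List.append_assoc, List.singleton_append]

-- ===== VERDICT (by name: the statement is the Claim_ definition above) =====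
theorem next_tile_pos_spec : Claim_equal_next_tile_pos := by
  intro puzzle _
  show ((puzzle.map (fun tile => (tile.2.1, tile.2.2))).foldl (fun adj_positions pos =>
      ([(1, 0), (-1, 0), (0, 1), (0, -1)] : List (Int × Int)).foldl (fun adj_positions offset =>
        if ¬ ((pos.1 + offset.1, pos.2 + offset.2) ∈
            (puzzle.map (fun tile => (tile.2.1, tile.2.2))) ++ adj_positions)
        then adj_positions ++ [(pos.1 + offset.1, pos.2 + offset.2)]
        else adj_positions) adj_positions) [])
    = pvBLoop (PySem.Set.ofList (puzzle.map (fun t => (t.2.1, t.2.2))))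
        (puzzle.flatMap (fun t =>
          [(t.2.1 + 1, t.2.2), (t.2.1 - 1, t.2.2), (t.2.1, t.2.2 + 1), (t.2.1, t.2.2 - 1)]))
  rw [pv_flatten (puzzle.map (fun tile => (tile.2.1, tile.2.2)))
      ([(1, 0), (-1, 0), (0, 1), (0, -1)] : List (Int × Int))
      (fun pos offset => (pos.1 + offset.1, pos.2 + offset.2))
      (fun a c => if ¬ (c ∈ (puzzle.map (fun tile => (tile.2.1, tile.2.2))) ++ a) then a ++ [c] else a)
      []]
  have hc : (puzzle.map (fun t => (t.2.1, t.2.2))).flatMap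
      (fun pos => ([(1, 0), (-1, 0), (0, 1), (0, -1)] : List (Int × Int)).map
        (fun offset => (pos.1 + offset.1, pos.2 + offset.2)))
      = puzzle.flatMap (fun t =>
          [(t.2.1 + 1, t.2.2), (t.2.1 - 1, t.2.2), (t.2.1, t.2.2 + 1), (t.2.1, t.2.2 - 1)]) := by
    rw [List.flatMap_map]
    apply List.flatMap_congr
    intro t _
    simp [List.map, sub_eq_add_neg]
  rw [hc, pv_main (puzzle.map (fun t => (t.2.1, t.2.2))) _ _ le_rfl []]
  simp
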